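-- pv_equiv track=rewrite | github.com/byungKHee/ps_study | 프로그래머스/2/150369. 택배 배달과 수거하기/택배 배달과 수거하기.py | solution
-- ===== SOURCE A (Python) =====
-- def find_last(arr):
--     for i in range(len(arr)-1, -1, -1):
--         if arr[i]:
--             return i
--     return -1
--
-- def solution(cap, n, deliveries, pickups):
--     answer = 0
--     d_last = find_last(deliveries)
--     p_last = find_last(pickups)
--     while True:
--         if d_last == -1 and p_last == -1:
--             break
--         answer += (max(d_last, p_last) + 1) * 2
--
--         # 배달물 전달
--         cnt = cap
--         for i in range(d_last, -1, -1):
--             if not deliveries[i]: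
--                 d_last -= 1
--                 continue
--             if cnt <= deliveries[i]:
--                 deliveries[i] -= cnt
--                 d_last = i
--                 if deliveries[i] == 0:
--                     while d_last >= 0 and deliveries[d_last] == 0:
--                         d_last -= 1
--                 break
--             else:
--                 cnt -= deliveries[i]
--                 deliveries[i] = 0
--                 d_last -= 1
--         cnt = cap
--         # 수거
--         for i in range(p_last, -1, -1):
--             if not pickups[i]:
--                 p_last -= 1
--                 continue
--             if cnt <= pickups[i]:
--                 pickups[i] -= cnt
--                 p_last = i
--                 if pickups[i] == 0:
--                     while p_last >= 0 and pickups[p_last] == 0: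
--                         p_last -= 1
--                 break
--             else:
--                 cnt -= pickups[i]
--                 pickups[i] = 0
--                 p_last -= 1
--     return answer
-- ===== SOURCE B (Python) =====
-- def _consume(stack, cnt):
--     # stack: (house, amount) stops, farthest house first
--     if not stack:
--         return []
--     i, v = stack[0]
--     if cnt <= v:
--         return stack[1:] if v == cnt else [(i, v - cnt)] + stack[1:]
--     return _consume(stack[1:], cnt - v)
--
-- def solution(cap, n, deliveries, pickups):
--     ds = [(i, v) for i, v in enumerate(deliveries) if v][::-1]
--     ps = [(i, v) for i, v in enumerate(pickups) if v][::-1]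
--     total = 0
--     while ds or ps:
--         far = max(ds[0][0] if ds else -1, ps[0][0] if ps else -1)
--         total += 2 * (far + 1)
--         ds = _consume(ds, cap)
--         ps = _consume(ps, cap)
--     return total
-- ===== Notes on version B (the rewrite author's own statement) =====
-- stated objective: simpler
-- what changed: Replaces A's in-place array simulation (find_last scans, per-pass zero-skipping and index bookkeeping over the mutated lists) by building a one-off agenda of nonzero (house, amount) stops per list, farthest first, and consuming cap from the agenda front each round.
import Mathlib
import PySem

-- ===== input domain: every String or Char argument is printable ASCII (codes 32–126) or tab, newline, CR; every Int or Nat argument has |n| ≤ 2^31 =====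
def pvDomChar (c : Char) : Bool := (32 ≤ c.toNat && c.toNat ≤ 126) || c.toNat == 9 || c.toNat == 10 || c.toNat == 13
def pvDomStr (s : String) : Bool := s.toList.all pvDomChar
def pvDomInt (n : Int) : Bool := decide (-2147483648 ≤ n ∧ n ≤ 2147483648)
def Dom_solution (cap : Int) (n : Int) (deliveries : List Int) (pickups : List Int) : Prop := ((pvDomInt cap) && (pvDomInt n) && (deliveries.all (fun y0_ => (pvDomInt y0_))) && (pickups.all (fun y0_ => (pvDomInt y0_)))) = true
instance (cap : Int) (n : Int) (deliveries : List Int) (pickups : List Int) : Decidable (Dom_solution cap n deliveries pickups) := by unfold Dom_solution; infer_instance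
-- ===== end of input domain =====

-- B replaces A's in-place array simulation (find_last scans, zero-skipping, index
-- bookkeeping) by a one-off agenda of nonzero (house, amount) stops consumed per
-- round (objective: simpler).  Equivalence is about the RETURN value only:
-- Python A mutates its list arguments in place (it zeroes them out), B does not.

-- ===== PORT A =====

-- find_last: scan from the top index downwards for the first truthy entry
def findLastGo (arr : List Int) : Nat → Int
  | 0 => -1
  | k+1 => if arr.getD k 0 ≠ 0 then (k : Int) else findLastGo arr k

def find_last (arr : List Int) : Int := findLastGo arr arr.length

-- the inner `while d_last >= 0 and arr[d_last] == 0: d_last -= 1`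
def skipZeros (arr : List Int) (j : Int) : Int :=
  if 0 ≤ j ∧ arr.getD j.toNat 0 = 0 then skipZeros arr (j - 1) else j
termination_by (j + 1).toNat
decreasing_by omega

-- one `for i in range(last, -1, -1)` pass of A (the loop keeps i = d_last in sync,
-- both are carried literally).  Indices are in range by A's control flow, so getD/set
-- are exact here.
def passLoop (arr : List Int) (dl cnt i : Int) : List Int × Int :=
  if i < 0 then (arr, dl)
  else
    let v := arr.getD i.toNat 0
    if v = 0 then passLoop arr (dl - 1) cnt (i - 1)
    else if cnt ≤ v then
      let arr' := arr.set i.toNat (v - cnt)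
      if v - cnt = 0 then (arr', skipZeros arr' i) else (arr', i)
    else passLoop (arr.set i.toNat 0) (dl - 1) (cnt - v) (i - 1)
termination_by (i + 1).toNat
decreasing_by all_goals omega

-- the `while True` loop; the fuel argument is a totality guard only
def mainLoop (cap : Int) : Nat → List Int → List Int → Int → Int → Int → Int
  | 0, _, _, _, _, acc => acc
  | fuel+1, d, p, dl, pl, acc =>
    if dl = -1 ∧ pl = -1 then acc
    else
      let acc' := acc + (max dl pl + 1) * 2
      let r1 := passLoop d dl cap dl
      let r2 := passLoop p pl cap pl
      mainLoop cap fuel r1.1 r2.1 r1.2 r2.2 acc'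

def solution (cap : Int) (n : Int) (deliveries : List Int) (pickups : List Int) : Int :=
  mainLoop cap ((deliveries.map Int.natAbs).sum + (pickups.map Int.natAbs).sum + 1)
    deliveries pickups (find_last deliveries) (find_last pickups) 0

-- ===== PORT B =====

-- _consume of Source B: structural recursion on the stack
def consume : List (Int × Int) → Int → List (Int × Int)
  | [], _ => []
  | (i, v) :: rest, cnt =>
    if cnt ≤ v then (if v = cnt then rest else (i, v - cnt) :: rest)
    else consume rest (cnt - v)

-- `[(i, v) for i, v in enumerate(arr) if v][::-1]`  ([::-1] is reverse,
-- PySem.List.slice?_none_none_neg_one)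
def nstack (arr : List Int) : List (Int × Int) :=
  ((PySem.List.enumerate arr 0).filter (fun x => x.2 != 0)).reverse

-- `ds[0][0] if ds else -1`
def headIdx : List (Int × Int) → Int
  | [] => -1
  | (i, _) :: _ => i

-- the `while ds or ps` loop of Source B; same fuel-style totality guard as port A
def bMain (cap : Int) : Nat → List (Int × Int) → List (Int × Int) → Int → Int
  | 0, _, _, total => total
  | fuel+1, ds, ps, total =>
    if ds = [] ∧ ps = [] then total
    else
      let far := max (headIdx ds) (headIdx ps)
      bMain cap fuel (consume ds cap) (consume ps cap) (total + 2 * (far + 1))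

def solution_alt (cap : Int) (n : Int) (deliveries : List Int) (pickups : List Int) : Int :=
  bMain cap ((deliveries.map Int.natAbs).sum + (pickups.map Int.natAbs).sum + 1)
    (nstack deliveries) (nstack pickups) 0

-- ===== PRECONDITION & SPEC =====
-- No Pre_: the ports (fuel-truncated identically) agree on every input; where
-- Python A's while-loop diverges (cap < 1 with a nonzero entry), Python B's loop
-- diverges identically, so there is no returned value to claim about.
def Spec_solution (cap : Int) (n : Int) (deliveries : List Int) (pickups : List Int) (out : Int) : Prop := out = solution_alt cap n deliveries pickups
instance (cap : Int) (n : Int) (deliveries : List Int) (pickups : List Int) (out : Int) : Decidable (Spec_solution cap n deliveries pickups out) := by unfold Spec_solution; infer_instance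

-- ===== CLAIM (what is proved, stated in full; the proofs are below) =====
def Claim_equal_solution : Prop := ∀ (cap : Int) (n : Int) (deliveries : List Int) (pickups : List Int), Dom_solution cap n deliveries pickups → Spec_solution cap n deliveries pickups (solution cap n deliveries pickups)

-- ===== LEMMAS AND PROOFS =====

-- `j` is the index of the last nonzero entry of `arr` (−1 if none)
def IsLast (arr : List Int) (j : Int) : Prop :=
  -1 ≤ j ∧ j < (arr.length : Int) ∧ (∀ x ∈ arr.drop (j + 1).toNat, x = 0) ∧
    (0 ≤ j → arr.getD j.toNat 0 ≠ 0)

-- the nonzero (index, value) stops of `arr` at indices ≤ i, farthest first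
def nzDown (arr : List Int) (i : Int) : List (Int × Int) :=
  if i < 0 then []
  else if arr.getD i.toNat 0 = 0 then nzDown arr (i - 1)
  else (i, arr.getD i.toNat 0) :: nzDown arr (i - 1)
termination_by (i + 1).toNat
decreasing_by all_goals omega

-- membership zeros-above-i ↔ getD zeros-above-i
theorem zeros_getD {arr : List Int} {i : Int}
    (h0 : ∀ x ∈ arr.drop (i + 1).toNat, x = 0) :
    ∀ m : Nat, i < (m : Int) → arr.getD m 0 = 0 := by
  intro m hm
  by_cases hml : m < arr.length
  · rw [List.getD_eq_getElem arr 0 hml]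
    apply h0
    have hsub : (i + 1).toNat ≤ m := by omega
    have : arr[m] = (arr.drop (i + 1).toNat)[m - (i + 1).toNat]'(by
        rw [List.length_drop]; omega) := by
      rw [List.getElem_drop]
      congr 1
      omega
    rw [this]
    exact List.getElem_mem _
  · exact List.getD_eq_default _ _ (by omega)

theorem getD_set_ne (l : List Int) (j m : Nat) (x : Int) (h : m ≠ j) :
    (l.set j x).getD m 0 = l.getD m 0 := by
  by_cases hm : m < l.length
  · have h1 : m < (l.set j x).length := by rw [List.length_set]; exact hm
    rw [List.getD_eq_getElem _ 0 h1, List.getD_eq_getElem l 0 hm, List.getElem_set]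
    rw [if_neg (by omega)]
  · rw [List.getD_eq_default _ _ (by rw [List.length_set]; omega),
      List.getD_eq_default _ _ (by omega)]

-- nzDown only looks at entries with index ≤ i
theorem nzDown_congr (arr arr' : List Int) (i : Int)
    (h : ∀ m : Nat, (m : Int) ≤ i → arr'.getD m 0 = arr.getD m 0) :
    nzDown arr' i = nzDown arr i := by
  by_cases hi : i < 0
  · rw [nzDown, if_pos hi]
    rw [nzDown, if_pos hi]
  · have hg : arr'.getD i.toNat 0 = arr.getD i.toNat 0 := h i.toNat (by omega)
    have hrec := nzDown_congr arr arr' (i - 1) (fun m hm => h m (by omega))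
    conv_lhs => rw [nzDown]
    conv_rhs => rw [nzDown]
    rw [if_neg hi, if_neg hi, hg, hrec]
termination_by (i + 1).toNat
decreasing_by all_goals omega

-- entries above i all zero: nzDown from anywhere ≥ i equals nzDown from i
theorem nzDown_zeros (arr : List Int) (i j : Int) (hi : -1 ≤ i) (hij : i ≤ j)
    (h : ∀ m : Nat, i < (m : Int) → arr.getD m 0 = 0) :
    nzDown arr j = nzDown arr i := by
  by_cases hji : j ≤ i
  · have : i = j := le_antisymm hij hji
    rw [this]
  · push_neg at hji
    have hj0 : ¬ j < 0 := by omega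
    have hz : arr.getD j.toNat 0 = 0 := h j.toNat (by omega)
    rw [nzDown, if_neg hj0, if_pos hz]
    exact nzDown_zeros arr i (j - 1) hi (by omega) h
termination_by (j - i).toNat
decreasing_by omega

-- shorthand: the full stack of a list
theorem isLast_nzD {arr : List Int} {dl : Int} (hl : IsLast arr dl) :
    nzDown arr ((arr.length : Int) - 1) = nzDown arr dl := by
  obtain ⟨h1, h2, h3, _⟩ := hl
  exact nzDown_zeros arr dl ((arr.length : Int) - 1) h1 (by omega) (zeros_getD h3)

theorem nzD_cases {arr : List Int} {dl : Int} (hl : IsLast arr dl) :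
    (dl = -1 ∧ nzDown arr ((arr.length : Int) - 1) = []) ∨
    (0 ≤ dl ∧ ∃ rest, nzDown arr ((arr.length : Int) - 1) =
        (dl, arr.getD dl.toNat 0) :: rest ∧ arr.getD dl.toNat 0 ≠ 0) := by
  rw [isLast_nzD hl]
  obtain ⟨h1, h2, h3, h4⟩ := hl
  rcases le_or_gt 0 dl with hdl | hdl
  · right
    refine ⟨hdl, nzDown arr (dl - 1), ?_, h4 hdl⟩
    rw [nzDown, if_neg (by omega), if_neg (h4 hdl)]
  · left
    have : dl = -1 := by omega
    subst this
    exact ⟨rfl, by rw [nzDown, if_pos (by omega)]⟩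

-- find_last returns the last nonzero index
theorem find_last_isLast (arr : List Int) : IsLast arr (find_last arr) := by
  unfold find_last
  have key : ∀ m, m ≤ arr.length → (∀ x ∈ arr.drop m, x = 0) → IsLast arr (findLastGo arr m) := by
    intro m
    induction m with
    | zero =>
      intro _ h0
      exact ⟨by norm_num [findLastGo], by simp [findLastGo]; omega,
        by simpa [findLastGo] using h0, by intro h; simp [findLastGo] at h⟩
    | succ k ih =>
      intro hm h0
      show IsLast arr (findLastGo arr (k+1))
      rw [findLastGo]
      split
      · rename_i hne
        refine ⟨by omega, by push_cast; omega, ?_, ?_⟩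
        · simpa using h0
        · intro _
          simpa using hne
      · rename_i hz
        push_neg at hz
        apply ih (by omega)
        intro x hx
        rw [List.drop_eq_getElem_cons (by omega : k < arr.length)] at hx
        rcases List.mem_cons.mp hx with rfl | hx2
        · rw [← List.getD_eq_getElem arr 0]
          exact hz
        · exact h0 x hx2
  apply key arr.length le_rfl
  simp

theorem skipZeros_isLast {arr : List Int} {j : Int}
    (hj1 : -1 ≤ j) (hj2 : j < (arr.length : Int))
    (h0 : ∀ x ∈ arr.drop (j+1).toNat, x = 0) : IsLast arr (skipZeros arr j) := by
  by_cases hc : 0 ≤ j ∧ arr.getD j.toNat 0 = 0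
  · rw [skipZeros, if_pos hc]
    apply skipZeros_isLast (by omega) (by omega)
    have heq : (j - 1 + 1).toNat = j.toNat := by omega
    rw [heq]
    intro x hx
    rw [List.drop_eq_getElem_cons (by omega : j.toNat < arr.length)] at hx
    rcases List.mem_cons.mp hx with rfl | hx2
    · rw [← List.getD_eq_getElem arr 0]
      exact hc.2
    · apply h0
      have : (j+1).toNat = j.toNat + 1 := by omega
      rw [this]
      exact hx2
  · rw [skipZeros, if_neg hc]
    push_neg at hc
    rcases le_or_gt 0 j with hj0 | hj0
    · exact ⟨by omega, hj2, h0, fun _ => hc hj0⟩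
    · have : j = -1 := by omega
      subst this
      exact ⟨le_rfl, hj2, h0, by omega⟩
termination_by (j + 1).toNat
decreasing_by omega

-- one pass of A preserves the length and re-establishes the IsLast invariant
theorem passLoop_keep {arr : List Int} {cnt i : Int} (hi1 : -1 ≤ i)
    (hi2 : i < (arr.length : Int)) (h0 : ∀ x ∈ arr.drop (i + 1).toNat, x = 0) :
    (passLoop arr i cnt i).1.length = arr.length ∧
    IsLast (passLoop arr i cnt i).1 (passLoop arr i cnt i).2 := by
  by_cases hneg : i < 0
  · rw [passLoop, if_pos hneg]
    have hie : i = -1 := by omega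
    subst hie
    exact ⟨rfl, le_rfl, by push_cast; omega, h0, by omega⟩
  · push_neg at hneg
    rw [passLoop, if_neg (by omega)]
    set v := arr.getD i.toNat 0 with hv
    have hil : i.toNat < arr.length := by omega
    by_cases hz : v = 0
    · rw [if_pos hz]
      have h0' : ∀ x ∈ arr.drop (i - 1 + 1).toNat, x = 0 := by
        have heq : (i - 1 + 1).toNat = i.toNat := by omega
        rw [heq]
        intro x hx
        rw [List.drop_eq_getElem_cons hil] at hx
        rcases List.mem_cons.mp hx with rfl | hx2
        · rw [← List.getD_eq_getElem arr 0]
          exact hz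
        · apply h0
          have : (i + 1).toNat = i.toNat + 1 := by omega
          rw [this]
          exact hx2
      exact passLoop_keep (by omega) (by omega) h0'
    · rw [if_neg hz]
      by_cases hle : cnt ≤ v
      · rw [if_pos hle]
        set arr' := arr.set i.toNat (v - cnt) with harr'
        have hlen' : arr'.length = arr.length := by rw [harr', List.length_set]
        have h0' : ∀ x ∈ arr'.drop (i + 1).toNat, x = 0 := by
          rw [harr', List.drop_set, if_pos (by omega)]
          exact h0
        by_cases hvc : v - cnt = 0
        · rw [if_pos hvc]
          exact ⟨hlen', skipZeros_isLast (by omega) (by rw [hlen']; omega) h0'⟩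
        · rw [if_neg hvc]
          refine ⟨hlen', by omega, by rw [hlen']; omega, h0', ?_⟩
          intro _
          have hlt : i.toNat < arr'.length := by rw [hlen']; omega
          rw [harr', List.getD_eq_getElem _ 0 hlt, List.getElem_set_self (by omega)]
          omega
      · rw [if_neg hle]
        set arr1 := arr.set i.toNat 0 with harr1
        have hlen1 : arr1.length = arr.length := by rw [harr1, List.length_set]
        have h01 : ∀ x ∈ arr1.drop (i - 1 + 1).toNat, x = 0 := by
          have heq : (i - 1 + 1).toNat = i.toNat := by omega
          rw [heq, harr1, List.drop_set, if_neg (by omega)]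
          have h2 : i.toNat - i.toNat = 0 := by omega
          rw [h2, List.drop_eq_getElem_cons hil, List.set_cons_zero]
          intro x hx
          rcases List.mem_cons.mp hx with rfl | hx2
          · rfl
          · apply h0
            have h3 : (i + 1).toNat = i.toNat + 1 := by omega
            rw [h3]
            exact hx2
        have := passLoop_keep (arr := arr1) (cnt := cnt - v) (i := i - 1)
          (by omega) (by rw [hlen1]; omega) h01
        exact ⟨by rw [this.1, hlen1], this.2⟩
termination_by (i + 1).toNat
decreasing_by all_goals omega

-- THE PASS/CONSUME CORRESPONDENCE: A's inner pass acts on the nonzero agenda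
-- exactly as B's consume
theorem passLoop_nz {arr : List Int} {cnt i : Int} (hi1 : -1 ≤ i)
    (hi2 : i < (arr.length : Int)) (h0 : ∀ x ∈ arr.drop (i + 1).toNat, x = 0) :
    nzDown (passLoop arr i cnt i).1 (((passLoop arr i cnt i).1.length : Int) - 1) =
      consume (nzDown arr i) cnt := by
  by_cases hneg : i < 0
  · rw [passLoop, if_pos hneg]
    have hie : i = -1 := by omega
    subst hie
    have hnil : nzDown arr (-1 : Int) = [] := by
      rw [nzDown]
      norm_num
    show nzDown arr ((arr.length : Int) - 1) = consume (nzDown arr (-1)) cnt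
    rw [nzDown_zeros arr (-1) ((arr.length : Int) - 1) (by omega) (by omega) (zeros_getD h0),
      hnil]
    rfl
  · push_neg at hneg
    rw [passLoop, if_neg (by omega)]
    set v := arr.getD i.toNat 0 with hv
    have hil : i.toNat < arr.length := by omega
    have hnzi : nzDown arr i =
        if v = 0 then nzDown arr (i - 1) else (i, v) :: nzDown arr (i - 1) := by
      rw [nzDown, if_neg (by omega), ← hv]
    by_cases hz : v = 0
    · rw [if_pos hz, hnzi, if_pos hz]
      have h0' : ∀ x ∈ arr.drop (i - 1 + 1).toNat, x = 0 := by
        have heq : (i - 1 + 1).toNat = i.toNat := by omega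
        rw [heq]
        intro x hx
        rw [List.drop_eq_getElem_cons hil] at hx
        rcases List.mem_cons.mp hx with rfl | hx2
        · rw [← List.getD_eq_getElem arr 0]
          exact hz
        · apply h0
          have : (i + 1).toNat = i.toNat + 1 := by omega
          rw [this]
          exact hx2
      exact passLoop_nz (by omega) (by omega) h0'
    · rw [if_neg hz, hnzi, if_neg hz]
      by_cases hle : cnt ≤ v
      · rw [if_pos hle]
        set arr' := arr.set i.toNat (v - cnt) with harr'
        have hlen' : arr'.length = arr.length := by rw [harr', List.length_set]
        have hbelow : nzDown arr' (i - 1) = nzDown arr (i - 1) :=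
          nzDown_congr arr arr' (i - 1)
            (fun m hm => getD_set_ne arr i.toNat m _ (by omega))
        have habove : ∀ m : Nat, i < (m : Int) → arr'.getD m 0 = 0 := by
          intro m hm
          rw [harr', getD_set_ne arr i.toNat m _ (by omega)]
          exact zeros_getD h0 m hm
        have hgi : arr'.getD i.toNat 0 = v - cnt := by
          have hlt : i.toNat < (arr.set i.toNat (v - cnt)).length := by
            rw [List.length_set]; omega
          rw [harr', List.getD_eq_getElem _ 0 hlt, List.getElem_set_self (by omega)]
        have hfull : nzDown arr' ((arr'.length : Int) - 1) = nzDown arr' i := by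
          rw [hlen']
          exact nzDown_zeros arr' i ((arr.length : Int) - 1) (by omega) (by omega) habove
        have hnz' : nzDown arr' i =
            if v - cnt = 0 then nzDown arr (i - 1) else (i, v - cnt) :: nzDown arr (i - 1) := by
          rw [nzDown, if_neg (by omega), hgi, hbelow]
        have hcons : consume ((i, v) :: nzDown arr (i - 1)) cnt =
            if v = cnt then nzDown arr (i - 1) else (i, v - cnt) :: nzDown arr (i - 1) := by
          rw [consume, if_pos hle]
        rw [hcons]
        by_cases hvc : v - cnt = 0
        · rw [if_pos hvc]
          dsimp only
          rw [hfull, hnz', if_pos hvc, if_pos (by omega)]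
        · rw [if_neg hvc]
          dsimp only
          rw [hfull, hnz', if_neg hvc, if_neg (by omega)]
      · rw [if_neg hle]
        set arr1 := arr.set i.toNat 0 with harr1
        have hlen1 : arr1.length = arr.length := by rw [harr1, List.length_set]
        have h01 : ∀ x ∈ arr1.drop (i - 1 + 1).toNat, x = 0 := by
          have heq : (i - 1 + 1).toNat = i.toNat := by omega
          rw [heq, harr1, List.drop_set, if_neg (by omega)]
          have h2 : i.toNat - i.toNat = 0 := by omega
          rw [h2, List.drop_eq_getElem_cons hil, List.set_cons_zero]
          intro x hx
          rcases List.mem_cons.mp hx with rfl | hx2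
          · rfl
          · apply h0
            have h3 : (i + 1).toNat = i.toNat + 1 := by omega
            rw [h3]
            exact hx2
        have hbelow : nzDown arr1 (i - 1) = nzDown arr (i - 1) :=
          nzDown_congr arr arr1 (i - 1)
            (fun m hm => getD_set_ne arr i.toNat m _ (by omega))
        have hrec := passLoop_nz (arr := arr1) (cnt := cnt - v) (i := i - 1)
          (by omega) (by rw [hlen1]; omega) h01
        rw [hrec, hbelow, consume, if_neg hle]
termination_by (i + 1).toNat
decreasing_by all_goals omega

-- Source B's stack comprehension builds exactly the nonzero agenda, farthest first
theorem nstack_eq (l : List Int) :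
    nstack l = nzDown l ((l.length : Int) - 1) := by
  have key : ∀ k : Nat, k ≤ l.length →
      (((PySem.List.enumerate l 0).take k).filter (fun x => x.2 != 0)).reverse =
        nzDown l ((k : Int) - 1) := by
    intro k
    induction k with
    | zero =>
      intro _
      rw [nzDown, if_pos (by norm_num)]
      rfl
    | succ k ih =>
      intro hk
      have hkl : k < l.length := by omega
      have hlen : k < (PySem.List.enumerate l 0).length := by
        rw [PySem.List.length_enumerate]
        exact hkl
      have htake : (PySem.List.enumerate l 0).take (k+1) =
          (PySem.List.enumerate l 0).take k ++ [((k : Int), l[k])] := by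
        rw [List.take_succ, List.getElem?_eq_getElem hlen, PySem.List.getElem_enumerate]
        simp
      have hE : ((k + 1 : Nat) : Int) - 1 = (k : Int) := by push_cast; ring
      have hgd : l.getD k 0 = l[k] := List.getD_eq_getElem l 0 hkl
      rw [htake, List.filter_append, List.reverse_append, hE,
        nzDown, if_neg (by omega), Int.toNat_natCast, hgd]
      by_cases hv : l[k] = 0
      · rw [if_pos hv]
        have hfil : ([((k : Int), l[k])].filter (fun x => x.2 != 0)) = [] := by
          simp [hv]
        rw [hfil, List.reverse_nil, List.nil_append]
        exact ih (by omega)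
      · rw [if_neg hv]
        have hfil : ([((k : Int), l[k])].filter (fun x => x.2 != 0)) = [((k : Int), l[k])] := by
          simp [hv]
        rw [hfil, List.reverse_singleton, List.singleton_append, ih (by omega)]
  have := key l.length le_rfl
  rw [List.take_of_length_le (by rw [PySem.List.length_enumerate])] at this
  exact this

-- THE ROUND BISIMULATION: with equal fuel, A's round loop and B's round loop
-- compute the same total
theorem main_eq (cap : Int) : ∀ (fuel : Nat) (d p : List Int) (dl pl acc : Int),
    IsLast d dl → IsLast p pl →
    mainLoop cap fuel d p dl pl acc =
      bMain cap fuel (nzDown d ((d.length : Int) - 1)) (nzDown p ((p.length : Int) - 1)) acc := by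
  intro fuel
  induction fuel with
  | zero => intro d p dl pl acc _ _; rfl
  | succ fuel ih =>
    intro d p dl pl acc hld hlp
    rw [mainLoop, bMain]
    have hdc := nzD_cases hld
    have hpc := nzD_cases hlp
    by_cases hend : dl = -1 ∧ pl = -1
    · rw [if_pos hend]
      rcases hdc with ⟨_, hd⟩ | ⟨hge, _⟩
      · rcases hpc with ⟨_, hp⟩ | ⟨hge, _⟩
        · rw [if_pos ⟨hd, hp⟩]
        · omega
      · omega
    · have hfar : max (headIdx (nzDown d ((d.length : Int) - 1)))
          (headIdx (nzDown p ((p.length : Int) - 1))) = max dl pl := by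
        have h1 : headIdx (nzDown d ((d.length : Int) - 1)) = dl := by
          rcases hdc with ⟨he, hd⟩ | ⟨_, rest, hd, _⟩
          · rw [hd, he]; rfl
          · rw [hd]; rfl
        have h2 : headIdx (nzDown p ((p.length : Int) - 1)) = pl := by
          rcases hpc with ⟨he, hp⟩ | ⟨_, rest, hp, _⟩
          · rw [hp, he]; rfl
          · rw [hp]; rfl
        rw [h1, h2]
      have hne : ¬ (nzDown d ((d.length : Int) - 1) = [] ∧
          nzDown p ((p.length : Int) - 1) = []) := by
        intro ⟨hd, hp⟩
        apply hend
        constructor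
        · rcases hdc with ⟨he, _⟩ | ⟨_, rest, hcons, _⟩
          · exact he
          · rw [hd] at hcons
            exact absurd hcons.symm (List.cons_ne_nil _ _)
        · rcases hpc with ⟨he, _⟩ | ⟨_, rest, hcons, _⟩
          · exact he
          · rw [hp] at hcons
            exact absurd hcons.symm (List.cons_ne_nil _ _)
      rw [if_neg hend, if_neg hne]
      dsimp only
      obtain ⟨hlen1, hld'⟩ := passLoop_keep (cnt := cap) hld.1 hld.2.1 hld.2.2.1
      obtain ⟨hlen2, hlp'⟩ := passLoop_keep (cnt := cap) hlp.1 hlp.2.1 hlp.2.2.1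
      have hnzd : consume (nzDown d ((d.length : Int) - 1)) cap =
          nzDown (passLoop d dl cap dl).1 (((passLoop d dl cap dl).1.length : Int) - 1) := by
        rw [isLast_nzD hld]
        exact (passLoop_nz hld.1 hld.2.1 hld.2.2.1).symm
      have hnzp : consume (nzDown p ((p.length : Int) - 1)) cap =
          nzDown (passLoop p pl cap pl).1 (((passLoop p pl cap pl).1.length : Int) - 1) := by
        rw [isLast_nzD hlp]
        exact (passLoop_nz hlp.1 hlp.2.1 hlp.2.2.1).symm
      rw [hfar, hnzd, hnzp, ih _ _ _ _ _ hld' hlp']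
      ring_nf

-- ===== VERDICT (by name: the statement is the Claim_ definition above) =====
theorem solution_spec : Claim_equal_solution := by
  intro cap n d p _
  show solution cap n d p = solution_alt cap n d p
  unfold solution solution_alt
  rw [nstack_eq d, nstack_eq p]
  exact main_eq cap _ d p _ _ 0 (find_last_isLast d) (find_last_isLast p)
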